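-- pv_equiv track=rewrite | github.com/iamabhishek98/leetcode_solutions | ambiguous-coordinates/ambiguous-coordinates.py | generate
-- ===== SOURCE A (Python) =====
-- def generate(x):
--     perm = []
--     if x[0]=='0' and x[-1]=='0':
--         if len(x) == 1:
--             perm.append(x)
--         return perm
--     if x[0] == '0':
--         perm.append("0."+x[1:])
--         return perm
--     if x[-1] == '0':
--         perm.append(x)
--         return perm
--     perm.append(x)
--     for i in range(1,len(x)):
--         perm.append(x[0:i]+"."+x[i:])
--     return perm
-- ===== SOURCE B (Python) =====
-- def generate(x):
--     # generate every candidate in A's order, keep those passing one validity test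
--     cands = [(x, "")] + [(x[:i], x[i:]) for i in range(1, len(x))]
--     return [p + "." + q if q else p
--             for p, q in cands
--             if (len(p) == 1 or p[0] != '0') and (q == "" or q[-1] != '0')]
-- ===== Notes on version B (the rewrite author's own statement) =====
-- stated objective: simpler
-- what changed: Replaces A's four-way leading/trailing-zero case analysis by a single generate-then-filter pass: enumerate every candidate split and keep those passing one validity predicate.
-- outside the precondition, e.g. on generate(''): A raises IndexError, B raises IndexError
import Mathlib
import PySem

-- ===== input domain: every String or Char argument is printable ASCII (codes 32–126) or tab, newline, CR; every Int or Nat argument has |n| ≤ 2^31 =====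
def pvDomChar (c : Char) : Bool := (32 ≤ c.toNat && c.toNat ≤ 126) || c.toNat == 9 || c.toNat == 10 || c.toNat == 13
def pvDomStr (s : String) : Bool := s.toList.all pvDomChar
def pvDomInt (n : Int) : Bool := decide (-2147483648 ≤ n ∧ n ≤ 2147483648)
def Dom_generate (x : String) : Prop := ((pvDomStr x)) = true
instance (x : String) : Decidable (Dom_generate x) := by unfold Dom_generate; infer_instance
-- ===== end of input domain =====

-- B is a simpler generate-then-filter rewrite of A's four-way case analysis; equal return values proved on nonempty strings (A raises IndexError on "").

-- ===== PORT A =====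
def generate (x : String) : List String :=
  let l := x.toList
  match PySem.List.pyGet? l 0, PySem.List.pyGet? l (-1) with
  | some c0, some cl =>
    if c0 = '0' ∧ cl = '0' then
      (if l.length = 1 then [String.ofList l] else [])
    else if c0 = '0' then
      [String.ofList ('0' :: '.' :: PySem.List.slice l (some 1) none)]
    else if cl = '0' then
      [String.ofList l]
    else
      (PySem.List.pyRange 1 l.length 1).foldl
        (fun acc i => acc ++ [String.ofList (PySem.List.slice l (some 0) (some i) ++ '.' :: PySem.List.slice l (some i) none)])
        [String.ofList l]
  | _, _ => []   -- x[0] on the empty string raises IndexError; excluded by Pre_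

-- ===== PORT B =====
-- validity predicate of Source B; p[0] / q[-1] via pyGet? (never evaluated on empties inside Pre_)
def pvOk (pq : List Char × List Char) : Bool :=
  (pq.1.length == 1 || ((PySem.List.pyGet? pq.1 0).getD '0' != '0')) &&
  (pq.2.isEmpty || ((PySem.List.pyGet? pq.2 (-1)).getD '0' != '0'))

def pvJoin (pq : List Char × List Char) : String :=
  if pq.2.isEmpty then String.ofList pq.1 else String.ofList (pq.1 ++ '.' :: pq.2)

def generate_alt (x : String) : List String :=
  let l := x.toList
  let cands := (l, ([] : List Char)) ::
    (PySem.List.pyRange 1 l.length 1).map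
      (fun i => (PySem.List.slice l (some 0) (some i), PySem.List.slice l (some i) none))
  (cands.filter pvOk).map pvJoin

-- ===== PRECONDITION & SPEC =====
-- Pre_ excludes only the empty string, on which A raises IndexError at x[0].
def Pre_generate (x : String) : Prop := x.toList ≠ []
instance (x : String) : Decidable (Pre_generate x) := by unfold Pre_generate; infer_instance
def pvWitness_generate : String := "100"
def Spec_generate (x : String) (out : List String) : Prop := out = generate_alt x
instance (x : String) (out : List String) : Decidable (Spec_generate x out) := by unfold Spec_generate; infer_instance

-- ===== CLAIM (what is proved, stated in full; the proofs are below) =====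
def Claim_equal_generate : Prop := ∀ (x : String), Dom_generate x → Pre_generate x → Spec_generate x (generate x)

-- ===== LEMMAS AND PROOFS =====

-- the split loop over pyRange, normalised to Nat indexing (used for both ports)
theorem pv_range_map {α : Type} (c : Char) (t : List Char) (f : List Char → List Char → α) :
    (PySem.List.pyRange 1 ((c :: t).length : Int) 1).map
      (fun i => f (PySem.List.slice (c :: t) (some 0) (some i)) (PySem.List.slice (c :: t) (some i) none))
    = (List.range t.length).map (fun k => f ((c :: t).take (k+1)) ((c :: t).drop (k+1))) := by
  rw [PySem.List.pyRange_one, List.map_map]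
  have h : (((c :: t).length : Int) - 1).toNat = t.length := by simp
  rw [h]
  refine List.map_congr_left ?_
  intro k hk
  simp only [Function.comp_apply]
  have h1 : (1 : Int) + (k : Int) = ((k+1 : Nat) : Int) := by push_cast; ring
  rw [h1, PySem.List.slice_from_natCast, PySem.List.slice_zero_start, PySem.List.slice_to_natCast]

theorem pv_drop_isEmpty (t : List Char) (k : Nat) (hk : k < t.length) :
    (t.drop k).isEmpty = false := by
  have h : t.drop k ≠ [] := by
    intro h
    have := congrArg List.length h
    simp only [List.length_drop, List.length_nil] at this
    omega
  rw [← Bool.not_eq_true]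
  simpa [List.isEmpty_iff] using h

theorem pv_getLast_drop (c : Char) (t : List Char) (k : Nat) (hk : k < t.length) :
    (t.drop k).getLast? = some ((c :: t).getLast (by simp)) := by
  have ht : t ≠ [] := by intro h; simp [h] at hk
  rw [List.getLast?_drop, if_neg (by omega), List.getLast?_eq_some_getLast (h := ht),
      List.getLast_cons ht]

theorem pv_ok_whole_true (c : Char) (t : List Char) (h : t = [] ∨ c ≠ '0') :
    pvOk (c :: t, []) = true := by
  rcases h with h | h
  · subst h; simp [pvOk]
  · simp [pvOk, h]

theorem pv_ok_whole_false (c : Char) (d : Char) (t' : List Char) (hc : c = '0') :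
    pvOk (c :: d :: t', []) = false := by
  subst hc
  simp [pvOk, PySem.List.pyGet?_zero_cons]

theorem pv_ok_split_true (c : Char) (t : List Char) (k : Nat) (hk : k < t.length)
    (h1 : k = 0 ∨ c ≠ '0') (h2 : (c :: t).getLast (by simp) ≠ '0') :
    pvOk ((c :: t).take (k+1), (c :: t).drop (k+1)) = true := by
  simp only [pvOk, List.take_succ_cons, List.drop_succ_cons]
  rw [PySem.List.pyGet?_zero_cons, PySem.List.pyGet?_neg_one, pv_getLast_drop c t k hk]
  have hne := pv_drop_isEmpty t k hk
  rcases h1 with h1 | h1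
  · subst h1; simp [h2]
  · simp [hne, h1, h2]

theorem pv_ok_split_false_last (c : Char) (t : List Char) (k : Nat) (hk : k < t.length)
    (h2 : (c :: t).getLast (by simp) = '0') :
    pvOk ((c :: t).take (k+1), (c :: t).drop (k+1)) = false := by
  simp only [pvOk, List.take_succ_cons, List.drop_succ_cons]
  rw [PySem.List.pyGet?_neg_one, pv_getLast_drop c t k hk]
  have hne := pv_drop_isEmpty t k hk
  simp [hne, h2]

theorem pv_ok_split_false_head (c : Char) (t : List Char) (k : Nat) (hk : k < t.length)
    (h1 : k ≠ 0) (hc : c = '0') :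
    pvOk ((c :: t).take (k+1), (c :: t).drop (k+1)) = false := by
  subst hc
  simp only [pvOk, List.take_succ_cons, List.drop_succ_cons]
  rw [PySem.List.pyGet?_zero_cons]
  have hlen : ('0' :: t.take k).length = k + 1 := by
    simp [List.length_take]; omega
  simp [hlen, h1]

theorem pv_join_whole (c : Char) (t : List Char) :
    pvJoin (c :: t, []) = String.ofList (c :: t) := by simp [pvJoin]

theorem pv_join_split (c : Char) (t : List Char) (k : Nat) (hk : k < t.length) :
    pvJoin ((c :: t).take (k+1), (c :: t).drop (k+1))
    = String.ofList ((c :: t).take (k+1) ++ '.' :: (c :: t).drop (k+1)) := by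
  have h : ((c :: t).drop (k+1)).isEmpty = false := by
    rw [List.drop_succ_cons]; exact pv_drop_isEmpty t k hk
  simp only [pvJoin, h, Bool.false_eq_true, if_false]

-- ===== VERDICT (by name: the statement is the Claim_ definition above) =====
theorem generate_spec : Claim_equal_generate := by
  unfold Claim_equal_generate
  intro x _ hpre
  unfold Spec_generate generate generate_alt
  unfold Pre_generate at hpre
  rcases hx : x.toList with _ | ⟨c, t⟩
  · exact absurd hx hpre
  have hcons : (c :: t) ≠ ([] : List Char) := by simp
  simp only [PySem.List.pyGet?_zero_cons, PySem.List.pyGet?_neg_one,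
    List.getLast?_eq_some_getLast (h := hcons)]
  rw [pv_range_map c t (fun p q => (p, q))]
  by_cases hc : c = '0' <;> by_cases hg : (c :: t).getLast hcons = '0'
  · -- leading and trailing zero
    rw [if_pos ⟨hc, hg⟩]
    rcases t with _ | ⟨d, t'⟩
    · -- single character: A keeps the whole string
      subst hc
      rw [if_pos (by simp)]
      simp [pvOk, pvJoin]
    · -- longer: A returns []
      rw [if_neg (by simp)]
      rw [List.filter_cons_of_neg (by simp [pv_ok_whole_false c d t' hc])]
      rw [List.filter_eq_nil_iff.mpr ?_]
      · simp
      · intro a ha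
        rw [List.mem_map] at ha
        obtain ⟨k, hk, rfl⟩ := ha
        rw [List.mem_range] at hk
        rw [pv_ok_split_false_last c (d :: t') k hk hg]
        simp
  · -- leading zero only: exactly the split after the first character survives
    rw [if_neg (by tauto), if_pos hc]
    have ht : t ≠ [] := by
      intro h; subst h; simp [List.getLast] at hg; exact hg hc
    rcases t with _ | ⟨d, t'⟩
    · exact absurd rfl ht
    rw [List.filter_cons_of_neg (by simp [pv_ok_whole_false c d t' hc])]
    simp only [List.length_cons]
    rw [List.range_succ_eq_map, List.map_cons, List.filter_cons_of_pos
      (by simpa using pv_ok_split_true c (d :: t') 0 (by simp) (Or.inl rfl) hg),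
      List.map_map, List.filter_eq_nil_iff.mpr ?_]
    · subst hc
      rw [PySem.List.slice_from_one]
      simp [pvJoin]
    · intro a ha
      rw [List.mem_map] at ha
      obtain ⟨k, hk, rfl⟩ := ha
      rw [List.mem_range] at hk
      simp only [Function.comp_apply]
      rw [pv_ok_split_false_head c (d :: t') (k + 1) (by simp; omega) (by omega) hc]
      simp
  · -- trailing zero only: only the whole string survives
    rw [if_neg (by tauto), if_neg hc, if_pos hg]
    rw [List.filter_cons_of_pos (by simp [pv_ok_whole_true c t (Or.inr hc)]),
        List.filter_eq_nil_iff.mpr ?_]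
    · simp [pv_join_whole]
    · intro a ha
      rw [List.mem_map] at ha
      obtain ⟨k, hk, rfl⟩ := ha
      rw [List.mem_range] at hk
      rw [pv_ok_split_false_last c t k hk hg]
      simp
  · -- no leading or trailing zero: every candidate survives
    rw [if_neg (by tauto), if_neg hc, if_neg hg]
    rw [PySem.List.foldl_append_singleton_eq_map,
        pv_range_map c t (fun p q => String.ofList (p ++ '.' :: q))]
    rw [List.filter_cons_of_pos (by simp [pv_ok_whole_true c t (Or.inr hc)]),
        List.filter_eq_self.mpr ?_]
    · rw [List.map_cons, pv_join_whole, List.map_map, List.singleton_append]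
      refine congrArg _ (List.map_congr_left ?_)
      intro k hk
      rw [List.mem_range] at hk
      simp only [Function.comp_apply]
      exact (pv_join_split c t k hk).symm
    · intro a ha
      rw [List.mem_map] at ha
      obtain ⟨k, hk, rfl⟩ := ha
      rw [List.mem_range] at hk
      exact pv_ok_split_true c t k hk (Or.inr hc) hg
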